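-- pv_equiv track=rewrite | github.com/afearnehough/aoc2021 | day17/day17.py | xvels
-- ===== SOURCE A (Python) =====
-- import math
--
-- def xvels(a, b):
--     result = [(b-a)]
--     for vel in reversed(range(math.ceil(result[0]/2)+1)):
--         c, d = vel, result[0]
--         while c > 0:
--             d -= c
--             c -= 1
--             if d == 0:
--                 result.append(vel)
--     return result
-- ===== SOURCE B (Python) =====
-- import math
--
-- def xvels(a, b):
--     # For each candidate velocity (descending), decide with a closed-form test
--     # whether some prefix of vel, vel-1, ... sums to b-a: T(vel) - (b-a) must be
--     # a triangular number T(j) with 0 <= j < vel, tested with an integer sqrt.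
--     n = b - a
--     result = [n]
--     for vel in range((n + 1) // 2, -1, -1):
--         tri = vel * (vel + 1) // 2
--         t = tri - n
--         if vel > 0 and 0 <= t and t + vel <= tri:
--             r = math.isqrt(8 * t + 1)
--             if r * r == 8 * t + 1:
--                 result.append(vel)
--     return result
-- ===== Notes on version B (the rewrite author's own statement) =====
-- stated objective: alternative
-- what changed: A's inner while-loop that subtracts vel, vel-1, ... step by step is replaced by a closed-form triangular-number test per velocity (T(vel)-(b-a) must be triangular, checked with math.isqrt), so the inner scan disappears.
import Mathlib
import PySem

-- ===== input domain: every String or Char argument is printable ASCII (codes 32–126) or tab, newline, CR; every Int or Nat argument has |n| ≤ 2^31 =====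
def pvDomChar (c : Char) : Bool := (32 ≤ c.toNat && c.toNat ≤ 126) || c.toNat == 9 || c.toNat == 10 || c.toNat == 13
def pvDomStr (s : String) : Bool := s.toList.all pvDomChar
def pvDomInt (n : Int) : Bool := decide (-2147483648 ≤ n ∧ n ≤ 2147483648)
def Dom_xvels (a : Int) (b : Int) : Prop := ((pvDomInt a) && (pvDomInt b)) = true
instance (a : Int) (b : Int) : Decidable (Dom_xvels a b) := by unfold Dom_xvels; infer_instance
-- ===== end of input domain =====

-- B replaces A's inner subtraction loop per velocity by a closed-form triangular-number test
-- (integer square root), a single pass over the velocities instead of two nested loops.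


-- ===== PORT A =====
-- the 'while c > 0: d -= c; c -= 1; if d == 0: result.append(vel)' loop, literally
def xvelsInner (vel : Int) (c : Int) (d : Int) (acc : List Int) : List Int :=
  if h : 0 < c then
    let d' := d - c
    let acc' := if d' = 0 then acc ++ [vel] else acc
    xvelsInner vel (c - 1) d' acc'
  else acc
termination_by c.toNat
decreasing_by omega

-- math.ceil(result[0]/2) is exact here: result[0] = b-a, and for an int n, ceil(n/2) = (n+1)//2
def xvels (a : Int) (b : Int) : List Int :=
  let r0 := b - a
  ((PySem.List.pyRange 0 (PySem.Int.floordiv (r0 + 1) 2 + 1) 1).reverse).foldl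
    (fun result vel => xvelsInner vel vel r0 result) [r0]

-- ===== PORT B =====
-- math.isqrt(x) on 0 ≤ x is Nat.sqrt of x.toNat (exact: both are floor square roots)
def xvels_alt (a : Int) (b : Int) : List Int :=
  let n := b - a
  (PySem.List.pyRange (PySem.Int.floordiv (n + 1) 2) (-1) (-1)).foldl
    (fun result vel =>
      let tri := PySem.Int.floordiv (vel * (vel + 1)) 2
      let t := tri - n
      if 0 < vel ∧ 0 ≤ t ∧ t + vel ≤ tri then
        let r : Int := Int.ofNat (Nat.sqrt (8 * t + 1).toNat)
        if r * r = 8 * t + 1 then result ++ [vel] else result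
      else result) [n]

-- ===== PRECONDITION & SPEC =====
def Spec_xvels (a : Int) (b : Int) (out : List Int) : Prop := out = xvels_alt a b
instance (a : Int) (b : Int) (out : List Int) : Decidable (Spec_xvels a b out) := by unfold Spec_xvels; infer_instance

-- ===== CLAIM (what is proved, stated in full; the proofs are below) =====
def Claim_equal_xvels : Prop := ∀ (a : Int) (b : Int), Dom_xvels a b → Spec_xvels a b (xvels a b)

-- ===== LEMMAS AND PROOFS =====

def hitsZero (c d : Int) : Prop := ∃ j : Int, 0 ≤ j ∧ j < c ∧ 2 * d = c * (c + 1) - j * (j + 1)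
theorem xvelsInner_miss (vel c d : Int) (acc : List Int) (h : ¬ hitsZero c d) :
    xvelsInner vel c d acc = acc := by
  fun_induction xvelsInner vel c d acc with
  | case1 c d acc hc d' acc' IH =>
      have hd : d - c ≠ 0 := fun h0 => h ⟨c - 1, by omega, by omega, by linear_combination 2 * h0⟩
      have hnz : ¬ hitsZero (c - 1) (d - c) := by
        rintro ⟨j, hj0, hjc, hje⟩
        exact h ⟨j, hj0, by omega, by linear_combination hje⟩
      simp only [d', acc', dif_neg hd] at IH ⊢
      exact IH hnz
  | case2 c d acc hc => rfl

theorem xvelsInner_hit (vel c d : Int) (acc : List Int) (h : hitsZero c d) :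
    xvelsInner vel c d acc = acc ++ [vel] := by
  fun_induction xvelsInner vel c d acc with
  | case1 c d acc hc d' acc' IH =>
      by_cases hd : d - c = 0
      · have hnz : ¬ hitsZero (c - 1) (d - c) := by
          rintro ⟨j, hj0, hjc, hje⟩
          have hc2 : 2 ≤ c := by omega
          nlinarith [mul_le_mul (show j ≤ c - 2 by omega) (show j + 1 ≤ c - 1 by omega)
            (show (0:ℤ) ≤ j + 1 by omega) (show (0:ℤ) ≤ c - 2 by omega)]
        simp only [d', acc', dif_pos hd]
        exact xvelsInner_miss vel (c - 1) (d - c) (acc ++ [vel]) hnz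
      · have h' : hitsZero (c - 1) (d - c) := by
          obtain ⟨j, hj0, hjc, hje⟩ := h
          have hjne : j ≠ c - 1 := by
            intro hjc1
            subst hjc1
            have : 2 * d = 2 * c := by linear_combination hje
            omega
          exact ⟨j, hj0, by omega, by linear_combination hje⟩
        simp only [d', acc', dif_neg hd] at IH ⊢
        exact IH h'
  | case2 c d acc hc =>
      obtain ⟨j, hj0, hjc, hje⟩ := h
      omega

theorem step_eq_gen (n vel F : Int) (acc : List Int) (hF : 2 * F = vel * (vel + 1)) :
    xvelsInner vel vel n acc =
      (if 0 < vel ∧ 0 ≤ F - n ∧ F - n + vel ≤ F then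
         if Int.ofNat (Nat.sqrt (8 * (F - n) + 1).toNat) *
              Int.ofNat (Nat.sqrt (8 * (F - n) + 1).toNat) = 8 * (F - n) + 1 then
           acc ++ [vel]
         else acc
       else acc) := by
  split_ifs with hC hr
  · -- condition and square test hold: the loop hits zero
    apply xvelsInner_hit
    obtain ⟨hv, ht0, htv⟩ := hC
    set r : Int := Int.ofNat (Nat.sqrt (8 * (F - n) + 1).toNat) with hrdef
    have hr0 : 0 ≤ r := Int.natCast_nonneg _
    have hodd : ¬ Even r := by
      intro he
      have h2 : Even (r * r) := he.mul_right r
      rw [hr, Int.even_iff] at h2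
      omega
    obtain ⟨u, hu⟩ := Int.not_even_iff_odd.mp hodd
    have hu0 : 0 ≤ u := by omega
    rw [hu] at hr
    have h4 : 4 * (u * (u + 1)) = 4 * (2 * (F - n)) := by linear_combination hr
    have h2t : u * (u + 1) = 2 * (F - n) := by linarith
    refine ⟨u, hu0, ?_, by linear_combination h2t + hF⟩
    by_contra hge
    push Not at hge
    have hm : vel * (vel + 1) ≤ u * (u + 1) :=
      mul_le_mul hge (by omega) (by omega) hu0
    linarith
  · -- condition holds but the square test fails: the loop cannot hit zero
    apply xvelsInner_miss
    rintro ⟨j, hj0, hjv, hje⟩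
    apply hr
    have h2t : j * (j + 1) = 2 * (F - n) := by linear_combination hje - hF
    have hsq : 8 * (F - n) + 1 = (2 * j + 1) * (2 * j + 1) := by linear_combination -(4:ℤ) * h2t
    have hmm : (8 * (F - n) + 1).toNat = (2 * j + 1).toNat * (2 * j + 1).toNat := by
      rw [hsq, Int.toNat_mul (by omega) (by omega)]
    rw [hmm, ← Nat.pow_two, Nat.sqrt_eq', Int.ofNat_eq_natCast,
      Int.toNat_of_nonneg (show (0:ℤ) ≤ 2 * j + 1 by omega)]
    linear_combination -2*hsq - 4*h2t
  · -- condition fails: the loop cannot hit zero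
    apply xvelsInner_miss
    rintro ⟨j, hj0, hjv, hje⟩
    apply hC
    have h2t : j * (j + 1) = 2 * (F - n) := by linear_combination hje - hF
    have hjj : 0 ≤ j * (j + 1) := mul_nonneg hj0 (by omega)
    have hm : j * (j + 1) ≤ (vel - 1) * vel :=
      mul_le_mul (by omega) (by omega) (by omega) (by omega)
    refine ⟨by omega, by linarith, ?_⟩
    nlinarith

-- ===== VERDICT (by name: the statement is the Claim_ definition above) =====
theorem xvels_spec : Claim_equal_xvels := by
  intro a b _
  unfold Spec_xvels xvels xvels_alt
  simp only [PySem.List.pyRange_neg_one_eq_reverse]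
  apply PySem.List.foldl_congr_mem
  intro acc x _
  exact step_eq_gen (b - a) x (PySem.Int.floordiv (x * (x + 1)) 2) acc
    (by rw [PySem.Int.floordiv_eq_ediv_of_pos (by norm_num)]
        exact Int.mul_ediv_cancel' (Int.even_mul_succ_self x).two_dvd)
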